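-- pv_equiv track=rewrite | github.com/AmirMDEV/aminate-public | maya_history_timeline.py | snapshots_has_future
-- ===== SOURCE A (Python) =====
-- def snapshots_has_future(manifest, snapshot_id, branch_id=None):
--     snapshots = manifest.get("snapshots") or []
--     if not snapshot_id:
--         return False
--     if branch_id:
--         snapshots = [item for item in snapshots if (item.get("branch_id") or "main") == branch_id]
--     for index, item in enumerate(snapshots):
--         if item.get("id") == snapshot_id:
--             return index < len(snapshots) - 1
--     return False
-- ===== SOURCE B (Python) =====
-- def snapshots_has_future(manifest, snapshot_id, branch_id=None):
--     if not snapshot_id: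
--         return False
--     snapshots = manifest.get("snapshots") or []
--     if branch_id:
--         snapshots = [item for item in snapshots if (item.get("branch_id") or "main") == branch_id]
--     # the id must match a snapshot that has a successor: pairwise zip existential
--     return any(cur.get("id") == snapshot_id for cur, _nxt in zip(snapshots, snapshots[1:]))
-- ===== Notes on version B (the rewrite author's own statement) =====
-- stated objective: simpler
-- what changed: Replaces the enumerate loop with its first-match index-vs-length comparison by an existential over zip(snapshots, snapshots[1:]): the id matches some snapshot that has a successor (first-match index < n-1 iff any match occurs strictly before the last element).
import Mathlib
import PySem

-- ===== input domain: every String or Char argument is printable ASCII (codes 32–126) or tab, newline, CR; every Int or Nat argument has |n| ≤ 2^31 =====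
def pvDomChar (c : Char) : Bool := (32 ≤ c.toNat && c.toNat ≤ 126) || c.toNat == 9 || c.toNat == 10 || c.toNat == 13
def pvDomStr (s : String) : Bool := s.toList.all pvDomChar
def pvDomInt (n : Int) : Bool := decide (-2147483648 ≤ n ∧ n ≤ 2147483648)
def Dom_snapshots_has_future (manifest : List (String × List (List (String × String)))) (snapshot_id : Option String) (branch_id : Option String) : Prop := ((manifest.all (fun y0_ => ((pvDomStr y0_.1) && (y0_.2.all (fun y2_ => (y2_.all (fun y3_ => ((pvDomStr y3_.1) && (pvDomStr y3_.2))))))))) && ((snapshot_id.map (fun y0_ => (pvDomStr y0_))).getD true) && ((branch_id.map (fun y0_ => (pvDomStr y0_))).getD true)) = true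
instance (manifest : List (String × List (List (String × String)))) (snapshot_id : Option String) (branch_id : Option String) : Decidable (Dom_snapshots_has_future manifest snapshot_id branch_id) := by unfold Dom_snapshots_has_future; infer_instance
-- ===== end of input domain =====

-- ===== PORT A =====
-- B replaces A's enumerate loop (first-match index < len-1) by an existential over
-- zip(snapshots, snapshots[1:]): the id matches a snapshot that has a successor.

-- `item.get(k) or dflt` (a missing or empty value falls back to the default)
def pvGetOr (d : List (String × String)) (k dflt : String) : String :=
  match List.lookup k d with
  | some v => if v = "" then dflt else v
  | none => dflt

-- the for-loop of A: enumerate(snapshots), return index < len(snapshots) - 1 at the first id match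
def pvLoopA (sid : String) (n : Nat) : Nat → List (List (String × String)) → Bool
  | _, [] => false
  | i, item :: rest =>
      if List.lookup "id" item = some sid then decide (i < n - 1)
      else pvLoopA sid n (i + 1) rest

def snapshots_has_future (manifest : List (String × List (List (String × String)))) (snapshot_id : Option String) (branch_id : Option String) : Bool :=
  let snapshots0 := (List.lookup "snapshots" manifest).getD []   -- manifest.get("snapshots") or []
  match snapshot_id with
  | none => false               -- if not snapshot_id: return False
  | some sid =>
    if sid = "" then false
    else
      let snapshots :=
        match branch_id with
        | some bid =>
            if bid = "" then snapshots0   -- falsy branch_id: no filtering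
            else snapshots0.filter (fun item => pvGetOr item "branch_id" "main" = bid)
        | none => snapshots0
      pvLoopA sid snapshots.length 0 snapshots

-- ===== PORT B =====
def snapshots_has_future_alt (manifest : List (String × List (List (String × String)))) (snapshot_id : Option String) (branch_id : Option String) : Bool :=
  match snapshot_id with
  | none => false               -- if not snapshot_id: return False
  | some sid =>
    if sid = "" then false
    else
      let snapshots0 := (List.lookup "snapshots" manifest).getD []   -- manifest.get("snapshots") or []
      let snapshots :=
        match branch_id with
        | some bid =>
            if bid = "" then snapshots0
            else snapshots0.filter (fun item => pvGetOr item "branch_id" "main" = bid)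
        | none => snapshots0
      -- any(cur.get("id") == snapshot_id for cur, _nxt in zip(snapshots, snapshots[1:]))
      (snapshots.zip snapshots.tail).any (fun p => List.lookup "id" p.1 == some sid)

-- ===== PRECONDITION & SPEC =====
def Spec_snapshots_has_future (manifest : List (String × List (List (String × String)))) (snapshot_id : Option String) (branch_id : Option String) (out : Bool) : Prop := out = snapshots_has_future_alt manifest snapshot_id branch_id
instance (manifest : List (String × List (List (String × String)))) (snapshot_id : Option String) (branch_id : Option String) (out : Bool) : Decidable (Spec_snapshots_has_future manifest snapshot_id branch_id out) := by unfold Spec_snapshots_has_future; infer_instance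

-- ===== CLAIM (what is proved, stated in full; the proofs are below) =====
def Claim_equal_snapshots_has_future : Prop := ∀ (manifest : List (String × List (List (String × String)))) (snapshot_id : Option String) (branch_id : Option String), Dom_snapshots_has_future manifest snapshot_id branch_id → Spec_snapshots_has_future manifest snapshot_id branch_id (snapshots_has_future manifest snapshot_id branch_id)

-- ===== LEMMAS AND PROOFS =====

-- A's loop from index i equals a match within the first (n-1-i) remaining elements
theorem pvLoopA_eq_take (sid : String) (n : Nat) :
    ∀ (l : List (List (String × String))) (i : Nat),
      pvLoopA sid n i l = (l.take (n - 1 - i)).any (fun item => List.lookup "id" item == some sid) := by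
  intro l
  induction l with
  | nil => intro i; simp [pvLoopA]
  | cons item rest ih =>
    intro i
    simp only [pvLoopA]
    by_cases h : List.lookup "id" item = some sid
    · simp only [h, if_pos]
      rcases Nat.eq_zero_or_pos (n - 1 - i) with h0 | hp
      · simp [h0]; omega
      · obtain ⟨k, hk⟩ : ∃ k, n - 1 - i = k + 1 := ⟨n - 1 - i - 1, by omega⟩
        rw [hk]
        simp only [List.take_succ_cons, List.any_cons, h, BEq.rfl, Bool.true_or]
        simp only [decide_eq_true_eq]
        omega
    · rw [if_neg h, ih (i + 1)]
      rcases Nat.eq_zero_or_pos (n - 1 - i) with h0 | hp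
      · have : n - 1 - (i + 1) = 0 := by omega
        simp [h0, this]
      · obtain ⟨k, hk⟩ : ∃ k, n - 1 - i = k + 1 := ⟨n - 1 - i - 1, by omega⟩
        have : n - 1 - (i + 1) = k := by omega
        simp [hk, this, h]

-- an existential over zip l l.tail on the first component = an existential over the first n-1 elements
theorem zip_tail_any_eq_take (sid : String) :
    ∀ (l : List (List (String × String))),
      ((l.zip l.tail).any fun p => List.lookup "id" p.1 == some sid) =
        ((l.take (l.length - 1)).any fun item => List.lookup "id" item == some sid) := by
  intro l
  induction l with
  | nil => rfl
  | cons x xs ih =>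
    cases xs with
    | nil => rfl
    | cons y ys =>
      simp only [List.tail_cons, List.zip_cons_cons, List.any_cons, List.length_cons,
        Nat.add_sub_cancel, List.take_succ_cons]
      have := ih
      simp only [List.tail_cons, List.length_cons, Nat.add_sub_cancel] at this
      rw [this]

-- ===== VERDICT (by name: the statement is the Claim_ definition above) =====
theorem snapshots_has_future_spec : Claim_equal_snapshots_has_future := by
  intro manifest snapshot_id branch_id _
  unfold Spec_snapshots_has_future snapshots_has_future snapshots_has_future_alt
  cases snapshot_id with
  | none => rfl
  | some sid =>
    simp only
    by_cases hs : sid = ""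
    · simp [hs]
    · cases branch_id with
      | none => simp [hs, pvLoopA_eq_take, zip_tail_any_eq_take]
      | some bid =>
        by_cases hb : bid = "" <;>
          simp [hs, hb, pvLoopA_eq_take, zip_tail_any_eq_take]
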